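-- pv_equiv track=rewrite | github.com/mmlhq/Convert2Xml | special.py | AssembleTable
-- ===== SOURCE A (Python) =====
-- def AssembleTable(row,column):
--     item = '{"alpha":0,"gbColor":"#FFFFFF"}'
--     cells = ''
--     for irow in range(row):
--         cell = '['
--         comma_r = ','
--         for icolumn in range(column):
--             comma_c = ','
--             if icolumn == column - 1:
--                 comma_c = ''
--             cell = cell + item + comma_c
--         cell += ']'
--         if irow == row - 1:
--             comma_r = ''
--         cells = cells + cell + comma_r
--     cells = "[" + cells + "]"
--     return  cells
-- ===== SOURCE B (Python) =====
-- def AssembleTable(row, column):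
--     item = '{"alpha":0,"gbColor":"#FFFFFF"}'
--     cell = '[' + ','.join([item] * column) + ']'
--     return '[' + ','.join([cell] * row) + ']'
-- ===== Notes on version B (the rewrite author's own statement) =====
-- stated objective: simpler
-- what changed: B drops both accumulator loops with per-element trailing-comma bookkeeping and instead builds one cell once via ','.join on a replicated list, then replicates and joins that cell for the whole table; A's repeated '+' concatenation copies the growing string each step (quadratic in output size), join builds it once.
import Mathlib
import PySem

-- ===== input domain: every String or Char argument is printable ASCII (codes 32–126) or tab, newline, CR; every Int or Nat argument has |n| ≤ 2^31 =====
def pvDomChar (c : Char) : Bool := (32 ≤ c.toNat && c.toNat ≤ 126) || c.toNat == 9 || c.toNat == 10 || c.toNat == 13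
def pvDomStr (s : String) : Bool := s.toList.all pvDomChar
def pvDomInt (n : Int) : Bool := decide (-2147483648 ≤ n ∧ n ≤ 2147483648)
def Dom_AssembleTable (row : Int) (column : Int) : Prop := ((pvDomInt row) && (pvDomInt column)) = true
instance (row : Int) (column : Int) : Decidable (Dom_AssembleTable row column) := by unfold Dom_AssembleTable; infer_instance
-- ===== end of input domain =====

-- B builds one cell string with ','.join over a replicated list and replicates that cell for the
-- whole table, replacing A's two accumulator loops with per-element trailing-comma bookkeeping (objective: simpler).


-- ===== PORT A =====
def AssembleTable (row : Int) (column : Int) : String :=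
  let item := "{\"alpha\":0,\"gbColor\":\"#FFFFFF\"}"
  let cells :=
    (PySem.List.pyRange 0 row 1).foldl (fun cells irow =>
      let cell :=
        (PySem.List.pyRange 0 column 1).foldl (fun cell icolumn =>
          let comma_c := if icolumn = column - 1 then "" else ","
          cell ++ item ++ comma_c) "["
      let cell := cell ++ "]"
      let comma_r := if irow = row - 1 then "" else ","
      cells ++ cell ++ comma_r) ""
  "[" ++ cells ++ "]"

-- ===== PORT B =====
def AssembleTable_alt (row : Int) (column : Int) : String :=
  let item := "{\"alpha\":0,\"gbColor\":\"#FFFFFF\"}"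
  let cell := "[" ++ PySem.Str.join "," (List.replicate column.toNat item) ++ "]"
  "[" ++ PySem.Str.join "," (List.replicate row.toNat cell) ++ "]"

-- ===== PRECONDITION & SPEC =====
def Spec_AssembleTable (row : Int) (column : Int) (out : String) : Prop := out = AssembleTable_alt row column
instance (row : Int) (column : Int) (out : String) : Decidable (Spec_AssembleTable row column out) := by unfold Spec_AssembleTable; infer_instance

-- ===== CLAIM (what is proved, stated in full; the proofs are below) =====
def Claim_equal_AssembleTable : Prop := ∀ (row : Int) (column : Int), Dom_AssembleTable row column → Spec_AssembleTable row column (AssembleTable row column)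

-- ===== LEMMAS AND PROOFS =====

-- repeated concatenation of a fixed string, prepended n times
def pvRep (n : Nat) (t : String) : String :=
  match n with
  | 0 => ""
  | n + 1 => t ++ pvRep n t

theorem pv_join_cons_cons (sep x y : String) (xs : List String) :
    PySem.Str.join sep (x :: y :: xs) = x ++ sep ++ PySem.Str.join sep (y :: xs) := by
  apply String.toList_inj.mp
  simp [PySem.Str.join, PySem.Chars.join_cons_cons]

theorem pv_join_singleton (sep x : String) :
    PySem.Str.join sep [x] = x := by
  apply String.toList_inj.mp
  simp [PySem.Str.join, PySem.Chars.join_singleton]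

theorem pv_join_nil (sep : String) : PySem.Str.join sep [] = "" := by
  apply String.toList_inj.mp
  simp [PySem.Str.join, PySem.Chars.join_nil]

-- Str.join of a replicated string, expressed as repeated (item ++ sep) blocks plus a final item
theorem pv_join_replicate (item : String) (n : Nat) :
    PySem.Str.join "," (List.replicate (n + 1) item) = pvRep n (item ++ ",") ++ item := by
  induction n with
  | zero => simp [pvRep, pv_join_singleton]
  | succ m ih =>
      rw [List.replicate_succ, List.replicate_succ]
      rw [pv_join_cons_cons]
      rw [List.replicate_succ] at ih
      rw [ih]
      show item ++ "," ++ (pvRep m (item ++ ",") ++ item) = pvRep (m + 1) (item ++ ",") ++ item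
      simp [pvRep, String.append_assoc]

-- a fold that appends a constant string once per list element
theorem pv_foldl_const {α : Type} (t : String) (l : List α) (s : String) :
    l.foldl (fun acc _ => acc ++ t) s = s ++ pvRep l.length t := by
  induction l generalizing s with
  | nil => simp [pvRep]
  | cons a l ih => simp [List.foldl_cons, ih, pvRep, String.append_assoc]

-- the Nat-indexed form of A's comma-sentinel loop
theorem pv_fold_range (item : String) (n : Nat) (s : String) :
    (List.range (n + 1)).foldl
      (fun acc k => acc ++ item ++ (if k = n then "" else ",")) s
    = s ++ PySem.Str.join "," (List.replicate (n + 1) item) := by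
  rw [List.range_succ, List.foldl_append]
  have h1 : (List.range n).foldl (fun acc k => acc ++ item ++ (if k = n then "" else ",")) s
      = (List.range n).foldl (fun acc _ => acc ++ (item ++ ",")) s := by
    apply PySem.List.foldl_congr_mem
    intro acc k hk
    rw [if_neg (Nat.ne_of_lt (List.mem_range.mp hk))]
    simp [String.append_assoc]
  rw [h1, pv_foldl_const]
  simp [pv_join_replicate, String.append_assoc]

-- A's loop over range(c) with trailing-comma sentinel equals s ++ join of c.toNat copies
theorem pv_fold_main (item : String) (c : Int) (s : String) :
    (PySem.List.pyRange 0 c 1).foldl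
      (fun acc k => acc ++ item ++ (if k = c - 1 then "" else ",")) s
    = s ++ PySem.Str.join "," (List.replicate c.toNat item) := by
  rw [PySem.List.pyRange_one]
  rw [List.foldl_map]
  rcases Nat.eq_zero_or_pos (c - 0).toNat with h0 | hpos
  · have hc : c.toNat = 0 := by omega
    simp [hc, pv_join_nil]
  · obtain ⟨n, hn⟩ : ∃ n, (c - 0).toNat = n + 1 := ⟨(c - 0).toNat - 1, by omega⟩
    have hc : c.toNat = n + 1 := by omega
    rw [hn, hc]
    rw [← pv_fold_range item n s]
    apply PySem.List.foldl_congr_mem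
    intro acc k hk
    have hcn : c - 1 = (n : Int) := by omega
    rw [hcn]
    by_cases hkn : k = n
    · simp [hkn]
    · rw [if_neg (by exact_mod_cast (by omega : (0:Int) + k ≠ n)), if_neg hkn]

theorem pv_AssembleTable_eq (row : Int) (column : Int) :
    AssembleTable row column = AssembleTable_alt row column := by
  unfold AssembleTable AssembleTable_alt
  simp only [pv_fold_main]
  rw [String.empty_append]

-- ===== VERDICT (by name: the statement is the Claim_ definition above) =====
theorem AssembleTable_spec : Claim_equal_AssembleTable := by
  intro row column _
  exact pv_AssembleTable_eq row column
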